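-- pv_equiv track=rewrite | github.com/cuthalionn/TurkishPoliticalTweetsStanceMap | source/MapGenerator.py | fillStanceDictNamesAsKeys
-- ===== SOURCE A (Python) =====
-- def fillStanceDictNamesAsKeys(firstSidePoints,secondSidePoints):
-- 	"""This function is used to fill a disctionary that holds each city and the number of
-- 	favs for each standing side.
--
-- 	The keys of the dictionary are city names
-- 		Args:
-- 			firstSidePoints(List): List of cities for the first side
-- 			secondSidePoints(List): List of cities for the second side
-- 		Returns:
-- 			Dictionary: A new dictionary object with all the cities and the nubmer of favs for
-- 			both sides
--
-- 	"""
-- 	newDict  = {}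
-- 	# value index 0 for akp 1 for chp
-- 	for point in firstSidePoints:
-- 		if point[0] in newDict.keys():
-- 			newDict[point[0]] = (newDict[point[0]][0] + 1,newDict[point[0]][1])
-- 		else:
-- 			newDict[point[0]] = (1,0)
--
-- 	for point in secondSidePoints:
-- 		if point[0] in newDict.keys():
-- 			newDict[point[0]] =  (newDict[point[0]][0],newDict[point[0]][1]+1)
-- 		else:
-- 			newDict[point[0]] = (0,1)
--
-- 	return newDict
-- ===== SOURCE B (Python) =====
-- def fillStanceDictNamesAsKeys(firstSidePoints, secondSidePoints):
--     """Tally per-city favs for both sides: dedup the cities in first-seen order,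
--     then count each city's occurrences on each side directly."""
--     keys1 = [p[0] for p in firstSidePoints]
--     keys2 = [p[0] for p in secondSidePoints]
--     return {city: (keys1.count(city), keys2.count(city))
--             for city in dict.fromkeys(keys1 + keys2)}
-- ===== Notes on version B (the rewrite author's own statement) =====
-- stated objective: idiomatic
-- what changed: Replaces A's incremental if-in-keys tuple patching of a dict by a declarative form: extract the two city lists, deduplicate their concatenation in first-seen order with dict.fromkeys, and build the result in one comprehension from per-side .count tallies (no per-element branching, no in-place updates); trades A's single O(n) pass for O(n*k) counting.
import Mathlib
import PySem

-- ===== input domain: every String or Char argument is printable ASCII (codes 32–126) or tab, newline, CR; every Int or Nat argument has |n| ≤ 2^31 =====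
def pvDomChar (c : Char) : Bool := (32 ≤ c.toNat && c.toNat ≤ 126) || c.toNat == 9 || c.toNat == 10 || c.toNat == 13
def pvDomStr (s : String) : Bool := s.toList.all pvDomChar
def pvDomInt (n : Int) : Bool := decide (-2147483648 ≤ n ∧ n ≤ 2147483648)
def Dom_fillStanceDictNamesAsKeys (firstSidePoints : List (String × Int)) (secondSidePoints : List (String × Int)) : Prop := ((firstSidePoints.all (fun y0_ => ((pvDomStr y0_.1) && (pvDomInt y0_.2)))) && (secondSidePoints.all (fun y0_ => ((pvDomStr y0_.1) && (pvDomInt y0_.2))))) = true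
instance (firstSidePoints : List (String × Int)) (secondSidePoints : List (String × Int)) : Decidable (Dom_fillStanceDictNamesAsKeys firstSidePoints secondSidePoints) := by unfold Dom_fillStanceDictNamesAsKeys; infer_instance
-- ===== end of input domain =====

-- B replaces the incremental if-in-keys dict patching by dedup-then-count (idiomatic; not faster).
-- ===== PORT A =====
def fillStanceDictNamesAsKeys (firstSidePoints : List (String × Int)) (secondSidePoints : List (String × Int)) : List (String × Int × Int) :=
  let d1 : PySem.Dict String (Int × Int) := firstSidePoints.foldl (fun d point =>
    if d.contains point.1 then
      d.insert point.1 ((d.getD point.1 (0, 0)).1 + 1, (d.getD point.1 (0, 0)).2)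
    else
      d.insert point.1 (1, 0)) PySem.Dict.empty
  let d2 : PySem.Dict String (Int × Int) := secondSidePoints.foldl (fun d point =>
    if d.contains point.1 then
      d.insert point.1 ((d.getD point.1 (0, 0)).1, (d.getD point.1 (0, 0)).2 + 1)
    else
      d.insert point.1 (0, 1)) d1
  d2.items

-- ===== PORT B =====
def fillStanceDictNamesAsKeys_alt (firstSidePoints : List (String × Int)) (secondSidePoints : List (String × Int)) : List (String × Int × Int) :=
  let keys1 := firstSidePoints.map (fun p => p.1)
  let keys2 := secondSidePoints.map (fun p => p.1)
  (PySem.List.dedup (keys1 ++ keys2)).map (fun city =>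
    (city, ((PySem.List.count keys1 city : Int), (PySem.List.count keys2 city : Int))))

-- ===== PRECONDITION & SPEC =====
def Spec_fillStanceDictNamesAsKeys (firstSidePoints : List (String × Int)) (secondSidePoints : List (String × Int)) (out : List (String × Int × Int)) : Prop := out = fillStanceDictNamesAsKeys_alt firstSidePoints secondSidePoints
instance (firstSidePoints : List (String × Int)) (secondSidePoints : List (String × Int)) (out : List (String × Int × Int)) : Decidable (Spec_fillStanceDictNamesAsKeys firstSidePoints secondSidePoints out) := by unfold Spec_fillStanceDictNamesAsKeys; infer_instance

-- ===== CLAIM (what is proved, stated in full; the proofs are below) =====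
def Claim_equal_fillStanceDictNamesAsKeys : Prop := ∀ (firstSidePoints : List (String × Int)) (secondSidePoints : List (String × Int)), Dom_fillStanceDictNamesAsKeys firstSidePoints secondSidePoints → Spec_fillStanceDictNamesAsKeys firstSidePoints secondSidePoints (fillStanceDictNamesAsKeys firstSidePoints secondSidePoints)

-- ===== LEMMAS AND PROOFS =====


-- Both branches of A's first loop body write the same value: when the key is absent getD is (0,0).
theorem stepA1_eq (d : PySem.Dict String (Int × Int)) (p : String × Int) :
    (if d.contains p.1 then
      d.insert p.1 ((d.getD p.1 (0, 0)).1 + 1, (d.getD p.1 (0, 0)).2)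
    else
      d.insert p.1 (1, 0))
    = d.insert p.1 ((d.getD p.1 (0, 0)).1 + 1, (d.getD p.1 (0, 0)).2) := by
  by_cases h : d.contains p.1
  · simp [h]
  · have hg : d.getD p.1 ((0 : Int), (0 : Int)) = (0, 0) :=
      PySem.Dict.getD_of_not_contains d (0, 0) (by simpa using h)
    simp [h, hg]

theorem stepA2_eq (d : PySem.Dict String (Int × Int)) (p : String × Int) :
    (if d.contains p.1 then
      d.insert p.1 ((d.getD p.1 (0, 0)).1, (d.getD p.1 (0, 0)).2 + 1)
    else
      d.insert p.1 (0, 1))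
    = d.insert p.1 ((d.getD p.1 (0, 0)).1, (d.getD p.1 (0, 0)).2 + 1) := by
  by_cases h : d.contains p.1
  · simp [h]
  · have hg : d.getD p.1 ((0 : Int), (0 : Int)) = (0, 0) :=
      PySem.Dict.getD_of_not_contains d (0, 0) (by simpa using h)
    simp [h, hg]

-- Value invariant of the first loop: it adds the key-count of the processed list to the first component.
theorem getD_loop1 (l : List (String × Int)) (d : PySem.Dict String (Int × Int)) (c : String) :
    (l.foldl (fun d p => d.insert p.1 ((d.getD p.1 (0, 0)).1 + 1, (d.getD p.1 (0, 0)).2)) d).getD c (0, 0)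
    = ((d.getD c (0, 0)).1 + ((l.map (fun p => p.1)).count c : Int), (d.getD c (0, 0)).2) := by
  induction l generalizing d with
  | nil => simp
  | cons x xs ih =>
    simp only [List.foldl_cons, ih, List.map_cons, PySem.Dict.getD_insert]
    by_cases h : c = x.1
    · simp [h]; ring
    · simp [h, Ne.symm h]

-- Value invariant of the second loop (second component).
theorem getD_loop2 (l : List (String × Int)) (d : PySem.Dict String (Int × Int)) (c : String) :
    (l.foldl (fun d p => d.insert p.1 ((d.getD p.1 (0, 0)).1, (d.getD p.1 (0, 0)).2 + 1)) d).getD c (0, 0)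
    = ((d.getD c (0, 0)).1, (d.getD c (0, 0)).2 + ((l.map (fun p => p.1)).count c : Int)) := by
  induction l generalizing d with
  | nil => simp
  | cons x xs ih =>
    simp only [List.foldl_cons, ih, List.map_cons, PySem.Dict.getD_insert]
    by_cases h : c = x.1
    · simp [h]; ring
    · simp [h, Ne.symm h]

-- ===== VERDICT (by name: the statement is the Claim_ definition above) =====
theorem fillStanceDictNamesAsKeys_spec : Claim_equal_fillStanceDictNamesAsKeys := by
  intro f s _
  unfold Spec_fillStanceDictNamesAsKeys fillStanceDictNamesAsKeys fillStanceDictNamesAsKeys_alt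
  simp only [stepA1_eq, stepA2_eq]
  set step1 := fun (d : PySem.Dict String (Int × Int)) (p : String × Int) =>
    d.insert p.1 ((d.getD p.1 (0, 0)).1 + 1, (d.getD p.1 (0, 0)).2) with hstep1
  set step2 := fun (d : PySem.Dict String (Int × Int)) (p : String × Int) =>
    d.insert p.1 ((d.getD p.1 (0, 0)).1, (d.getD p.1 (0, 0)).2 + 1) with hstep2
  have hnd1 : (f.foldl step1 PySem.Dict.empty).keys.Nodup := by
    rw [hstep1]
    exact PySem.Dict.nodup_keys_foldl_insert_key f (fun p => p.1) _ _ (by simp)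
  have hnd2 : (s.foldl step2 (f.foldl step1 PySem.Dict.empty)).keys.Nodup := by
    rw [hstep2]
    exact PySem.Dict.nodup_keys_foldl_insert_key s (fun p => p.1) _ _ hnd1
  rw [PySem.Dict.items_eq_map_keys _ hnd2 (0, 0)]
  have hkeys : (s.foldl step2 (f.foldl step1 PySem.Dict.empty)).keys
      = PySem.Set.ofList (f.map (fun p => p.1) ++ s.map (fun p => p.1)) := by
    rw [hstep2, PySem.Dict.keys_foldl_insert_key, hstep1, PySem.Dict.keys_foldl_insert_key]
    simp [PySem.Set.ofList_append, PySem.Set.update_nil_left, PySem.Dict.keys_empty]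
  rw [hkeys, PySem.List.dedup_eq_ofList]
  apply List.map_congr_left
  intro c _
  rw [hstep2, getD_loop2, hstep1, getD_loop1]
  simp [PySem.Dict.getD_empty]
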